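-- pv_equiv track=rewrite | github.com/commonriskpro/lightcode | experiments/tool-embed-finetune/build_seed_100k.py | fill_semantic
-- ===== SOURCE A (Python) =====
-- ANCHOR_WHEN = [
--     "before the release train",
--     "during code review",
--     "for the onboarding doc",
--     "while pairing with a lead",
--     "after the merge to main",
--     "for the security audit",
--     "in the incident channel",
--     "during the canary phase",
--     "for the PM demo",
--     "before prod cutover",
--     "when CI is red",
--     "for local dev only",
--     "in the staging stack",
--     "for EU tenant parity",
--     "for the billing team",
--     "after standup",
--     "before the handoff",
--     "for the client success call",
--     "while shadowing deploy",
--     "for SOC2 evidence",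
--     "during freeze week",
--     "for the perf regression",
--     "after the schema migration",
--     "for the mobile release",
--     "when debugging flaky tests",
--     "for the API contract review",
--     "before the feature flag flip",
--     "for the embed widget",
--     "during on-call",
--     "for the data warehouse export",
--     "after the rollback drill",
--     "for the design partner",
--     "when narrowing blast radius",
--     "before the chaos test",
--     "for the load test report",
--     "after the dependency bump",
--     "for the migration runbook",
--     "when the deploy is stuck",
--     "for the retro notes",
--     "before the sprint demo",
--     "for the branch cut",
-- ]
--
-- def fill_semantic(base: list[str], need: int) -> list[str]:
--     """Extend with natural phrases; never uses numeric (r123) suffixes."""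
--     out = list(base)
--     seen = set(out)
--     if len(out) >= need:
--         return out[:need]
--
--     for b in base:
--         for w in ANCHOR_WHEN:
--             a = f"{b}; {w}"
--             if a not in seen:
--                 seen.add(a)
--                 out.append(a)
--                 if len(out) >= need:
--                     return out[:need]
--
--     for b in base:
--         for w in ANCHOR_WHEN:
--             a = f"{b} — {w}"
--             if a not in seen:
--                 seen.add(a)
--                 out.append(a)
--                 if len(out) >= need:
--                     return out[:need]
--
--     for b in base:
--         for w1 in ANCHOR_WHEN:
--             for w2 in ANCHOR_WHEN:
--                 a = f"{b}; {w1}; {w2}"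
--                 if a not in seen:
--                     seen.add(a)
--                     out.append(a)
--                     if len(out) >= need:
--                         return out[:need]
--
--     for b in base:
--         for w1 in ANCHOR_WHEN:
--             for w2 in ANCHOR_WHEN:
--                 for w3 in ANCHOR_WHEN:
--                     a = f"{b}; {w1}; {w2}; {w3}"
--                     if a not in seen:
--                         seen.add(a)
--                         out.append(a)
--                         if len(out) >= need:
--                             return out[:need]
--
--     return out[:need]
-- ===== SOURCE B (Python) =====
-- ANCHOR_WHEN = [
--     "before the release train",
--     "during code review",
--     "for the onboarding doc",
--     "while pairing with a lead",
--     "after the merge to main",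
--     "for the security audit",
--     "in the incident channel",
--     "during the canary phase",
--     "for the PM demo",
--     "before prod cutover",
--     "when CI is red",
--     "for local dev only",
--     "in the staging stack",
--     "for EU tenant parity",
--     "for the billing team",
--     "after standup",
--     "before the handoff",
--     "for the client success call",
--     "while shadowing deploy",
--     "for SOC2 evidence",
--     "during freeze week",
--     "for the perf regression",
--     "after the schema migration",
--     "for the mobile release",
--     "when debugging flaky tests",
--     "for the API contract review",
--     "before the feature flag flip",
--     "for the embed widget",
--     "during on-call",
--     "for the data warehouse export",
--     "after the rollback drill",
--     "for the design partner",
--     "when narrowing blast radius",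
--     "before the chaos test",
--     "for the load test report",
--     "after the dependency bump",
--     "for the migration runbook",
--     "when the deploy is stuck",
--     "for the retro notes",
--     "before the sprint demo",
--     "for the branch cut",
-- ]
--
--
-- def fill_semantic(base: list[str], need: int) -> list[str]:
--     """Extend with natural phrases via a single indexed loop over the virtual
--     candidate sequence (tier/base/word decoded arithmetically from the index)."""
--     W = ANCHOR_WHEN
--     n = len(W)
--     m = len(base)
--
--     def cand(i: int) -> str:
--         if i < m * n:
--             b, w = divmod(i, n)
--             return base[b] + "; " + W[w]
--         i -= m * n
--         if i < m * n:
--             b, w = divmod(i, n)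
--             return base[b] + " \u2014 " + W[w]
--         i -= m * n
--         if i < m * n * n:
--             b, r = divmod(i, n * n)
--             w1, w2 = divmod(r, n)
--             return base[b] + "; " + W[w1] + "; " + W[w2]
--         i -= m * n * n
--         b, r = divmod(i, n * n * n)
--         w1, r = divmod(r, n * n)
--         w2, w3 = divmod(r, n)
--         return base[b] + "; " + W[w1] + "; " + W[w2] + "; " + W[w3]
--
--     total = m * (2 * n + n * n + n * n * n)
--     out = list(base)
--     seen = set(out)
--     i = 0
--     while len(out) < need and i < total:
--         a = cand(i)
--         i += 1
--         if a not in seen: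
--             seen.add(a)
--             out.append(a)
--     return out[:need]
-- ===== Notes on version B (the rewrite author's own statement) =====
-- stated objective: alternative
-- what changed: A's four tiers of duplicated nested dedup-and-fill loops (each with its own early return) are replaced by one driver loop over a single candidate index that is decoded arithmetically (divmod) into tier, base element and word positions, so the dedup/append/stop logic exists exactly once.
import Mathlib
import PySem

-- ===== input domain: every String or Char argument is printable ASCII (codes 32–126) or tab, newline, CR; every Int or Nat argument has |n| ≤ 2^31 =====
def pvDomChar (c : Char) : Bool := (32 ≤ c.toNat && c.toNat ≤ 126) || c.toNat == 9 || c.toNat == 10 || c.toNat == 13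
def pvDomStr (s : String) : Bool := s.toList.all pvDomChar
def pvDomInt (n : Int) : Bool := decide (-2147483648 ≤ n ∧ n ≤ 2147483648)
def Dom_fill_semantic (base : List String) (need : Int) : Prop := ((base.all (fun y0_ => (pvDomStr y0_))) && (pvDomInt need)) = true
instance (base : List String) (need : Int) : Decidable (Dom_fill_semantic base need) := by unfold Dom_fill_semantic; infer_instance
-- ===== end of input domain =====

-- B replaces A's four copies of the dedup-and-fill loop (nested for-loops per tier) by ONE driver
-- loop over a single candidate index that is decoded arithmetically into (tier, base element, words);
-- same return value on every input (both return, never raise).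

def ANCHOR_WHEN : List String := [
  "before the release train",
  "during code review",
  "for the onboarding doc",
  "while pairing with a lead",
  "after the merge to main",
  "for the security audit",
  "in the incident channel",
  "during the canary phase",
  "for the PM demo",
  "before prod cutover",
  "when CI is red",
  "for local dev only",
  "in the staging stack",
  "for EU tenant parity",
  "for the billing team",
  "after standup",
  "before the handoff",
  "for the client success call",
  "while shadowing deploy",
  "for SOC2 evidence",
  "during freeze week",
  "for the perf regression",
  "after the schema migration",
  "for the mobile release",
  "when debugging flaky tests",
  "for the API contract review",
  "before the feature flag flip",
  "for the embed widget",
  "during on-call",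
  "for the data warehouse export",
  "after the rollback drill",
  "for the design partner",
  "when narrowing blast radius",
  "before the chaos test",
  "for the load test report",
  "after the dependency bump",
  "for the migration runbook",
  "when the deploy is stuck",
  "for the retro notes",
  "before the sprint demo",
  "for the branch cut"]

-- ===== PORT A =====
-- A's loops return early ('return out[:need]'): each loop is ported as a recursion whose result is
-- 'Sum.inl (out, seen)' (loop finished, state continues) or 'Sum.inr r' (early return with r).

-- 'for w in ANCHOR_WHEN: a = f"{b}; {w}" ...' (first tier's inner loop)
def fsInner1 (need : Int) (b : String) (out : List String) (seen : PySem.Set String) : List String → (List String × PySem.Set String) ⊕ List String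
  | [] => Sum.inl (out, seen)
  | w :: ws =>
    let a := b ++ "; " ++ w
    if PySem.Set.contains seen a then fsInner1 need b out seen ws
    else if need ≤ (((out ++ [a]).length : Nat) : Int) then Sum.inr (PySem.List.slice (out ++ [a]) none (some need))
    else fsInner1 need b (out ++ [a]) (PySem.Set.add seen a) ws

-- 'for b in base:' (first tier)
def fsLoop1 (need : Int) (out : List String) (seen : PySem.Set String) : List String → (List String × PySem.Set String) ⊕ List String
  | [] => Sum.inl (out, seen)
  | b :: bs =>
    match fsInner1 need b out seen ANCHOR_WHEN with
    | Sum.inr r => Sum.inr r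
    | Sum.inl (out', seen') => fsLoop1 need out' seen' bs

-- second tier: 'a = f"{b} — {w}"'
def fsInner2 (need : Int) (b : String) (out : List String) (seen : PySem.Set String) : List String → (List String × PySem.Set String) ⊕ List String
  | [] => Sum.inl (out, seen)
  | w :: ws =>
    let a := b ++ " — " ++ w
    if PySem.Set.contains seen a then fsInner2 need b out seen ws
    else if need ≤ (((out ++ [a]).length : Nat) : Int) then Sum.inr (PySem.List.slice (out ++ [a]) none (some need))
    else fsInner2 need b (out ++ [a]) (PySem.Set.add seen a) ws

def fsLoop2 (need : Int) (out : List String) (seen : PySem.Set String) : List String → (List String × PySem.Set String) ⊕ List String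
  | [] => Sum.inl (out, seen)
  | b :: bs =>
    match fsInner2 need b out seen ANCHOR_WHEN with
    | Sum.inr r => Sum.inr r
    | Sum.inl (out', seen') => fsLoop2 need out' seen' bs

-- third tier: 'for w2 in ANCHOR_WHEN: a = f"{b}; {w1}; {w2}"'
def fsInner3 (need : Int) (b w1 : String) (out : List String) (seen : PySem.Set String) : List String → (List String × PySem.Set String) ⊕ List String
  | [] => Sum.inl (out, seen)
  | w2 :: ws =>
    let a := b ++ "; " ++ w1 ++ "; " ++ w2
    if PySem.Set.contains seen a then fsInner3 need b w1 out seen ws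
    else if need ≤ (((out ++ [a]).length : Nat) : Int) then Sum.inr (PySem.List.slice (out ++ [a]) none (some need))
    else fsInner3 need b w1 (out ++ [a]) (PySem.Set.add seen a) ws

def fsMid3 (need : Int) (b : String) (out : List String) (seen : PySem.Set String) : List String → (List String × PySem.Set String) ⊕ List String
  | [] => Sum.inl (out, seen)
  | w1 :: ws =>
    match fsInner3 need b w1 out seen ANCHOR_WHEN with
    | Sum.inr r => Sum.inr r
    | Sum.inl (out', seen') => fsMid3 need b out' seen' ws

def fsLoop3 (need : Int) (out : List String) (seen : PySem.Set String) : List String → (List String × PySem.Set String) ⊕ List String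
  | [] => Sum.inl (out, seen)
  | b :: bs =>
    match fsMid3 need b out seen ANCHOR_WHEN with
    | Sum.inr r => Sum.inr r
    | Sum.inl (out', seen') => fsLoop3 need out' seen' bs

-- fourth tier: 'a = f"{b}; {w1}; {w2}; {w3}"'
def fsInner4 (need : Int) (b w1 w2 : String) (out : List String) (seen : PySem.Set String) : List String → (List String × PySem.Set String) ⊕ List String
  | [] => Sum.inl (out, seen)
  | w3 :: ws =>
    let a := b ++ "; " ++ w1 ++ "; " ++ w2 ++ "; " ++ w3
    if PySem.Set.contains seen a then fsInner4 need b w1 w2 out seen ws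
    else if need ≤ (((out ++ [a]).length : Nat) : Int) then Sum.inr (PySem.List.slice (out ++ [a]) none (some need))
    else fsInner4 need b w1 w2 (out ++ [a]) (PySem.Set.add seen a) ws

def fsMid4b (need : Int) (b w1 : String) (out : List String) (seen : PySem.Set String) : List String → (List String × PySem.Set String) ⊕ List String
  | [] => Sum.inl (out, seen)
  | w2 :: ws =>
    match fsInner4 need b w1 w2 out seen ANCHOR_WHEN with
    | Sum.inr r => Sum.inr r
    | Sum.inl (out', seen') => fsMid4b need b w1 out' seen' ws

def fsMid4a (need : Int) (b : String) (out : List String) (seen : PySem.Set String) : List String → (List String × PySem.Set String) ⊕ List String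
  | [] => Sum.inl (out, seen)
  | w1 :: ws =>
    match fsMid4b need b w1 out seen ANCHOR_WHEN with
    | Sum.inr r => Sum.inr r
    | Sum.inl (out', seen') => fsMid4a need b out' seen' ws

def fsLoop4 (need : Int) (out : List String) (seen : PySem.Set String) : List String → (List String × PySem.Set String) ⊕ List String
  | [] => Sum.inl (out, seen)
  | b :: bs =>
    match fsMid4a need b out seen ANCHOR_WHEN with
    | Sum.inr r => Sum.inr r
    | Sum.inl (out', seen') => fsLoop4 need out' seen' bs

def fill_semantic (base : List String) (need : Int) : List String :=
  let out := base                              -- out = list(base)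
  let seen := PySem.Set.ofList out             -- seen = set(out)
  if need ≤ ((out.length : Nat) : Int) then PySem.List.slice out none (some need)
  else
    match fsLoop1 need out seen base with
    | Sum.inr r => r
    | Sum.inl (o1, s1) =>
      match fsLoop2 need o1 s1 base with
      | Sum.inr r => r
      | Sum.inl (o2, s2) =>
        match fsLoop3 need o2 s2 base with
        | Sum.inr r => r
        | Sum.inl (o3, s3) =>
          match fsLoop4 need o3 s3 base with
          | Sum.inr r => r
          | Sum.inl (o4, _) => PySem.List.slice o4 none (some need)

-- ===== PORT B =====
-- 'cand(i)' of Source B: the loop index i is a nonnegative Python int, so divmod = Nat division here (exact).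
def candAt (base : List String) (i : Nat) : String :=
  let n := ANCHOR_WHEN.length
  let m := base.length
  if i < m * n then
    base.getD (i / n) "" ++ "; " ++ ANCHOR_WHEN.getD (i % n) ""
  else
    let i2 := i - m * n
    if i2 < m * n then
      base.getD (i2 / n) "" ++ " — " ++ ANCHOR_WHEN.getD (i2 % n) ""
    else
      let i3 := i2 - m * n
      if i3 < m * n * n then
        base.getD (i3 / (n * n)) "" ++ "; " ++ ANCHOR_WHEN.getD (i3 % (n * n) / n) "" ++ "; " ++ ANCHOR_WHEN.getD (i3 % (n * n) % n) ""
      else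
        let i4 := i3 - m * n * n
        base.getD (i4 / (n * n * n)) "" ++ "; " ++ ANCHOR_WHEN.getD (i4 % (n * n * n) / (n * n)) "" ++ "; " ++ ANCHOR_WHEN.getD (i4 % (n * n * n) % (n * n) / n) "" ++ "; " ++ ANCHOR_WHEN.getD (i4 % (n * n * n) % (n * n) % n) ""

-- Source B's 'while len(out) < need and i < total:' — fuel = total - i counts the remaining indices.
def fsAltLoop (base : List String) (need : Int) (out : List String) (seen : PySem.Set String) (i : Nat) : Nat → List String
  | 0 => PySem.List.slice out none (some need)
  | fuel + 1 =>
    if need ≤ ((out.length : Nat) : Int) then PySem.List.slice out none (some need)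
    else
      let a := candAt base i
      if PySem.Set.contains seen a then fsAltLoop base need out seen (i + 1) fuel
      else fsAltLoop base need (out ++ [a]) (PySem.Set.add seen a) (i + 1) fuel

def fill_semantic_alt (base : List String) (need : Int) : List String :=
  let n := ANCHOR_WHEN.length
  let total := base.length * (2 * n + n * n + n * n * n)
  fsAltLoop base need base (PySem.Set.ofList base) 0 total

-- ===== PRECONDITION & SPEC =====
def Spec_fill_semantic (base : List String) (need : Int) (out : List String) : Prop := out = fill_semantic_alt base need
instance (base : List String) (need : Int) (out : List String) : Decidable (Spec_fill_semantic base need out) := by unfold Spec_fill_semantic; infer_instance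

-- ===== CLAIM (what is proved, stated in full; the proofs are below) =====
def Claim_equal_fill_semantic : Prop := ∀ (base : List String) (need : Int), Dom_fill_semantic base need → Spec_fill_semantic base need (fill_semantic base need)

-- ===== LEMMAS AND PROOFS =====

-- The flat candidate list both programs walk, in priority order.
def tier1 (base : List String) : List String := base.flatMap (fun b => ANCHOR_WHEN.map (fun w => b ++ "; " ++ w))
def tier2 (base : List String) : List String := base.flatMap (fun b => ANCHOR_WHEN.map (fun w => b ++ " — " ++ w))
def tier3 (base : List String) : List String := base.flatMap (fun b => ANCHOR_WHEN.flatMap (fun w1 => ANCHOR_WHEN.map (fun w2 => b ++ "; " ++ w1 ++ "; " ++ w2)))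
def tier4 (base : List String) : List String := base.flatMap (fun b => ANCHOR_WHEN.flatMap (fun w1 => ANCHOR_WHEN.flatMap (fun w2 => ANCHOR_WHEN.map (fun w3 => b ++ "; " ++ w1 ++ "; " ++ w2 ++ "; " ++ w3))))
def tierCands (base : List String) : List String := tier1 base ++ tier2 base ++ tier3 base ++ tier4 base

-- A's loop shape, generalized over the list of candidates (early return = Sum.inr).
def runC (need : Int) (out : List String) (seen : PySem.Set String) : List String → (List String × PySem.Set String) ⊕ List String
  | [] => Sum.inl (out, seen)
  | a :: cs =>
    if PySem.Set.contains seen a then runC need out seen cs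
    else if need ≤ (((out ++ [a]).length : Nat) : Int) then Sum.inr (PySem.List.slice (out ++ [a]) none (some need))
    else runC need (out ++ [a]) (PySem.Set.add seen a) cs

-- B's loop shape: the check sits at the top and the final truncation is built in.
def runT (need : Int) (out : List String) (seen : PySem.Set String) : List String → List String
  | [] => PySem.List.slice out none (some need)
  | a :: cs =>
    if need ≤ ((out.length : Nat) : Int) then PySem.List.slice out none (some need)
    else if PySem.Set.contains seen a then runT need out seen cs
    else runT need (out ++ [a]) (PySem.Set.add seen a) cs

lemma runC_append (need : Int) (c1 : List String) : ∀ (out : List String) (seen : PySem.Set String) (c2 : List String),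
    runC need out seen (c1 ++ c2) =
      (match runC need out seen c1 with
       | Sum.inr r => Sum.inr r
       | Sum.inl (o, s) => runC need o s c2) := by
  induction c1 with
  | nil => intro out seen c2; simp [runC]
  | cons a cs ih =>
    intro out seen c2
    simp only [List.cons_append, runC]
    split
    · exact ih out seen c2
    · split
      · rfl
      · exact ih _ _ c2

lemma fsInner1_eq (need : Int) (b : String) : ∀ (ws : List String) (out : List String) (seen : PySem.Set String),
    fsInner1 need b out seen ws = runC need out seen (ws.map (fun w => b ++ "; " ++ w)) := by
  intro ws
  induction ws with
  | nil => intro out seen; rfl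
  | cons w ws ih =>
    intro out seen
    simp only [fsInner1, List.map_cons, runC]
    split
    · exact ih out seen
    · split
      · rfl
      · exact ih _ _

lemma fsLoop1_eq (need : Int) : ∀ (bs : List String) (out : List String) (seen : PySem.Set String),
    fsLoop1 need out seen bs = runC need out seen (bs.flatMap (fun b => ANCHOR_WHEN.map (fun w => b ++ "; " ++ w))) := by
  intro bs
  induction bs with
  | nil => intro out seen; rfl
  | cons b bs ih =>
    intro out seen
    simp only [fsLoop1, List.flatMap_cons, runC_append, fsInner1_eq]
    cases runC need out seen (ANCHOR_WHEN.map (fun w => b ++ "; " ++ w)) with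
    | inr r => rfl
    | inl st => exact ih st.1 st.2

lemma fsInner2_eq (need : Int) (b : String) : ∀ (ws : List String) (out : List String) (seen : PySem.Set String),
    fsInner2 need b out seen ws = runC need out seen (ws.map (fun w => b ++ " — " ++ w)) := by
  intro ws
  induction ws with
  | nil => intro out seen; rfl
  | cons w ws ih =>
    intro out seen
    simp only [fsInner2, List.map_cons, runC]
    split
    · exact ih out seen
    · split
      · rfl
      · exact ih _ _

lemma fsLoop2_eq (need : Int) : ∀ (bs : List String) (out : List String) (seen : PySem.Set String),
    fsLoop2 need out seen bs = runC need out seen (bs.flatMap (fun b => ANCHOR_WHEN.map (fun w => b ++ " — " ++ w))) := by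
  intro bs
  induction bs with
  | nil => intro out seen; rfl
  | cons b bs ih =>
    intro out seen
    simp only [fsLoop2, List.flatMap_cons, runC_append, fsInner2_eq]
    cases runC need out seen (ANCHOR_WHEN.map (fun w => b ++ " — " ++ w)) with
    | inr r => rfl
    | inl st => exact ih st.1 st.2

lemma fsInner3_eq (need : Int) (b w1 : String) : ∀ (ws : List String) (out : List String) (seen : PySem.Set String),
    fsInner3 need b w1 out seen ws = runC need out seen (ws.map (fun w2 => b ++ "; " ++ w1 ++ "; " ++ w2)) := by
  intro ws
  induction ws with
  | nil => intro out seen; rfl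
  | cons w ws ih =>
    intro out seen
    simp only [fsInner3, List.map_cons, runC]
    split
    · exact ih out seen
    · split
      · rfl
      · exact ih _ _

lemma fsMid3_eq (need : Int) (b : String) : ∀ (ws : List String) (out : List String) (seen : PySem.Set String),
    fsMid3 need b out seen ws = runC need out seen (ws.flatMap (fun w1 => ANCHOR_WHEN.map (fun w2 => b ++ "; " ++ w1 ++ "; " ++ w2))) := by
  intro ws
  induction ws with
  | nil => intro out seen; rfl
  | cons w1 ws ih =>
    intro out seen
    simp only [fsMid3, List.flatMap_cons, runC_append, fsInner3_eq]
    cases runC need out seen (ANCHOR_WHEN.map (fun w2 => b ++ "; " ++ w1 ++ "; " ++ w2)) with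
    | inr r => rfl
    | inl st => exact ih st.1 st.2

lemma fsLoop3_eq (need : Int) : ∀ (bs : List String) (out : List String) (seen : PySem.Set String),
    fsLoop3 need out seen bs = runC need out seen (bs.flatMap (fun b => ANCHOR_WHEN.flatMap (fun w1 => ANCHOR_WHEN.map (fun w2 => b ++ "; " ++ w1 ++ "; " ++ w2)))) := by
  intro bs
  induction bs with
  | nil => intro out seen; rfl
  | cons b bs ih =>
    intro out seen
    simp only [fsLoop3, List.flatMap_cons, runC_append, fsMid3_eq]
    cases runC need out seen (ANCHOR_WHEN.flatMap (fun w1 => ANCHOR_WHEN.map (fun w2 => b ++ "; " ++ w1 ++ "; " ++ w2))) with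
    | inr r => rfl
    | inl st => exact ih st.1 st.2

lemma fsInner4_eq (need : Int) (b w1 w2 : String) : ∀ (ws : List String) (out : List String) (seen : PySem.Set String),
    fsInner4 need b w1 w2 out seen ws = runC need out seen (ws.map (fun w3 => b ++ "; " ++ w1 ++ "; " ++ w2 ++ "; " ++ w3)) := by
  intro ws
  induction ws with
  | nil => intro out seen; rfl
  | cons w ws ih =>
    intro out seen
    simp only [fsInner4, List.map_cons, runC]
    split
    · exact ih out seen
    · split
      · rfl
      · exact ih _ _

lemma fsMid4b_eq (need : Int) (b w1 : String) : ∀ (ws : List String) (out : List String) (seen : PySem.Set String),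
    fsMid4b need b w1 out seen ws = runC need out seen (ws.flatMap (fun w2 => ANCHOR_WHEN.map (fun w3 => b ++ "; " ++ w1 ++ "; " ++ w2 ++ "; " ++ w3))) := by
  intro ws
  induction ws with
  | nil => intro out seen; rfl
  | cons w2 ws ih =>
    intro out seen
    simp only [fsMid4b, List.flatMap_cons, runC_append, fsInner4_eq]
    cases runC need out seen (ANCHOR_WHEN.map (fun w3 => b ++ "; " ++ w1 ++ "; " ++ w2 ++ "; " ++ w3)) with
    | inr r => rfl
    | inl st => exact ih st.1 st.2

lemma fsMid4a_eq (need : Int) (b : String) : ∀ (ws : List String) (out : List String) (seen : PySem.Set String),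
    fsMid4a need b out seen ws = runC need out seen (ws.flatMap (fun w1 => ANCHOR_WHEN.flatMap (fun w2 => ANCHOR_WHEN.map (fun w3 => b ++ "; " ++ w1 ++ "; " ++ w2 ++ "; " ++ w3)))) := by
  intro ws
  induction ws with
  | nil => intro out seen; rfl
  | cons w1 ws ih =>
    intro out seen
    simp only [fsMid4a, List.flatMap_cons, runC_append, fsMid4b_eq]
    cases runC need out seen (ANCHOR_WHEN.flatMap (fun w2 => ANCHOR_WHEN.map (fun w3 => b ++ "; " ++ w1 ++ "; " ++ w2 ++ "; " ++ w3))) with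
    | inr r => rfl
    | inl st => exact ih st.1 st.2

lemma fsLoop4_eq (need : Int) : ∀ (bs : List String) (out : List String) (seen : PySem.Set String),
    fsLoop4 need out seen bs = runC need out seen (bs.flatMap (fun b => ANCHOR_WHEN.flatMap (fun w1 => ANCHOR_WHEN.flatMap (fun w2 => ANCHOR_WHEN.map (fun w3 => b ++ "; " ++ w1 ++ "; " ++ w2 ++ "; " ++ w3))))) := by
  intro bs
  induction bs with
  | nil => intro out seen; rfl
  | cons b bs ih =>
    intro out seen
    simp only [fsLoop4, List.flatMap_cons, runC_append, fsMid4a_eq]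
    cases runC need out seen (ANCHOR_WHEN.flatMap (fun w1 => ANCHOR_WHEN.flatMap (fun w2 => ANCHOR_WHEN.map (fun w3 => b ++ "; " ++ w1 ++ "; " ++ w2 ++ "; " ++ w3)))) with
    | inr r => rfl
    | inl st => exact ih st.1 st.2

-- A equals the generic runner on the whole candidate list.
lemma fill_semantic_eq_runC (base : List String) (need : Int) (h : ¬ need ≤ ((base.length : Nat) : Int)) :
    fill_semantic base need =
      (match runC need base (PySem.Set.ofList base) (tierCands base) with
       | Sum.inr r => r
       | Sum.inl (o, _) => PySem.List.slice o none (some need)) := by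
  unfold fill_semantic
  rw [if_neg h]
  rw [show tierCands base = tier1 base ++ (tier2 base ++ (tier3 base ++ tier4 base)) from by simp [tierCands]]
  rw [runC_append, fsLoop1_eq]
  simp only [tier1, tier2, tier3, tier4]
  cases runC need base (PySem.Set.ofList base) (base.flatMap (fun b => ANCHOR_WHEN.map (fun w => b ++ "; " ++ w))) with
  | inr r => rfl
  | inl st1 =>
    obtain ⟨o1, s1⟩ := st1
    dsimp only
    rw [runC_append, fsLoop2_eq]
    cases runC need o1 s1 (base.flatMap (fun b => ANCHOR_WHEN.map (fun w => b ++ " — " ++ w))) with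
    | inr r => rfl
    | inl st2 =>
      obtain ⟨o2, s2⟩ := st2
      dsimp only
      rw [runC_append, fsLoop3_eq]
      cases runC need o2 s2 (base.flatMap (fun b => ANCHOR_WHEN.flatMap (fun w1 => ANCHOR_WHEN.map (fun w2 => b ++ "; " ++ w1 ++ "; " ++ w2)))) with
      | inr r => rfl
      | inl st3 =>
        obtain ⟨o3, s3⟩ := st3
        dsimp only
        rw [fsLoop4_eq]

lemma runT_of_full (need : Int) (out : List String) (seen : PySem.Set String) (cs : List String)
    (h : need ≤ ((out.length : Nat) : Int)) : runT need out seen cs = PySem.List.slice out none (some need) := by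
  cases cs with
  | nil => rfl
  | cons a cs => simp [runT, h]

-- Bridge: A's after-append check equals B's top check while the list is not yet full.
lemma runC_eq_runT (need : Int) : ∀ (cs : List String) (out : List String) (seen : PySem.Set String),
    ¬ need ≤ ((out.length : Nat) : Int) →
    (match runC need out seen cs with
     | Sum.inr r => r
     | Sum.inl (o, _) => PySem.List.slice o none (some need)) = runT need out seen cs := by
  intro cs
  induction cs with
  | nil => intro out seen h; rfl
  | cons a cs ih =>
    intro out seen h
    by_cases hc : PySem.Set.contains seen a = true
    · simp only [runC, runT, if_neg h, hc, if_true]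
      exact ih out seen h
    · by_cases hful : need ≤ (((out ++ [a]).length : Nat) : Int)
      · simp only [runC, runT, if_neg h, hc, if_pos hful]
        exact (runT_of_full need _ _ cs hful).symm
      · simp only [runC, runT, if_neg h, hc, if_neg hful]
        exact ih _ _ hful

-- ----- the candidate list's length and indexing, for B's side -----

lemma flatMap_length_const (l : List String) (f : String → List String) (k : Nat)
    (hk : ∀ a ∈ l, (f a).length = k) : (l.flatMap f).length = l.length * k := by
  induction l with
  | nil => simp
  | cons x l ih =>
    simp only [List.flatMap_cons, List.length_append, List.length_cons]
    rw [hk x (by simp), ih (fun a ha => hk a (by simp [ha]))]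
    ring

lemma getD_flatMap_const (f : String → List String) (k : Nat) : ∀ (l : List String) (q r : Nat),
    (∀ a ∈ l, (f a).length = k) → q < l.length → r < k →
    (l.flatMap f).getD (q * k + r) "" = (f (l.getD q "")).getD r "" := by
  intro l
  induction l with
  | nil => intro q r _ hq _; simp at hq
  | cons x l ih =>
    intro q r hk hq hr
    cases q with
    | zero =>
      simp only [List.flatMap_cons, Nat.zero_mul, Nat.zero_add, List.getD_cons_zero]
      rw [List.getD_append _ _ _ _ (by rw [hk x (by simp)]; exact hr)]
    | succ q =>
      have hx : (f x).length = k := hk x (by simp)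
      simp only [List.flatMap_cons, List.getD_cons_succ]
      rw [show (q + 1) * k + r = (f x).length + (q * k + r) by rw [hx]; ring]
      rw [List.getD_append_right _ _ _ _ (by omega)]
      rw [Nat.add_sub_cancel_left]
      exact ih q r (fun a ha => hk a (by simp [ha])) (by simpa using hq) hr

lemma length_tier1 (base : List String) : (tier1 base).length = base.length * ANCHOR_WHEN.length :=
  flatMap_length_const base _ _ (fun a _ => by simp)
lemma length_tier2 (base : List String) : (tier2 base).length = base.length * ANCHOR_WHEN.length :=
  flatMap_length_const base _ _ (fun a _ => by simp)
lemma length_tier3 (base : List String) : (tier3 base).length = base.length * (ANCHOR_WHEN.length * ANCHOR_WHEN.length) :=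
  flatMap_length_const base _ _ (fun a _ => flatMap_length_const _ _ _ (fun b _ => by simp))
lemma length_tier4 (base : List String) : (tier4 base).length = base.length * (ANCHOR_WHEN.length * (ANCHOR_WHEN.length * ANCHOR_WHEN.length)) :=
  flatMap_length_const base _ _ (fun a _ => flatMap_length_const _ _ _ (fun b _ => flatMap_length_const _ _ _ (fun c _ => by simp)))

lemma length_tierCands (base : List String) :
    (tierCands base).length = base.length * (2 * ANCHOR_WHEN.length + ANCHOR_WHEN.length * ANCHOR_WHEN.length + ANCHOR_WHEN.length * ANCHOR_WHEN.length * ANCHOR_WHEN.length) := by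
  simp only [tierCands, List.length_append, length_tier1, length_tier2, length_tier3, length_tier4]
  ring

lemma getD_map_of_lt (f : String → String) (l : List String) (r : Nat) (hr : r < l.length) :
    (l.map f).getD r "" = f (l.getD r "") := by
  rw [List.getD_eq_getElem _ _ (by simpa using hr), List.getD_eq_getElem _ _ hr, List.getElem_map]

lemma tier1_getD (base : List String) (q r : Nat) (hq : q < base.length) (hr : r < 41) :
    (tier1 base).getD (q * 41 + r) "" = base.getD q "" ++ "; " ++ ANCHOR_WHEN.getD r "" := by
  rw [show (41 : Nat) = ANCHOR_WHEN.length from rfl] at hr ⊢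
  simp only [tier1]
  rw [getD_flatMap_const _ _ base q r (fun a _ => by simp) hq hr]
  rw [getD_map_of_lt _ _ _ hr]

lemma tier2_getD (base : List String) (q r : Nat) (hq : q < base.length) (hr : r < 41) :
    (tier2 base).getD (q * 41 + r) "" = base.getD q "" ++ " — " ++ ANCHOR_WHEN.getD r "" := by
  rw [show (41 : Nat) = ANCHOR_WHEN.length from rfl] at hr ⊢
  simp only [tier2]
  rw [getD_flatMap_const _ _ base q r (fun a _ => by simp) hq hr]
  rw [getD_map_of_lt _ _ _ hr]

lemma tier3_getD (base : List String) (q r : Nat) (hq : q < base.length) (hr : r < 41 * 41) :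
    (tier3 base).getD (q * (41 * 41) + r) "" =
      base.getD q "" ++ "; " ++ ANCHOR_WHEN.getD (r / 41) "" ++ "; " ++ ANCHOR_WHEN.getD (r % 41) "" := by
  have hn : ANCHOR_WHEN.length = 41 := rfl
  have hr' : r < ANCHOR_WHEN.length * ANCHOR_WHEN.length := by simp only [hn]; omega
  rw [show ((41 : Nat) * 41) = ANCHOR_WHEN.length * ANCHOR_WHEN.length from rfl]
  simp only [tier3]
  rw [getD_flatMap_const _ _ base q r (fun a _ => flatMap_length_const _ _ _ (fun b _ => by simp)) hq hr']
  conv_lhs => rw [← Nat.div_add_mod' r 41]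
  rw [show (41 : Nat) = ANCHOR_WHEN.length from rfl]
  rw [getD_flatMap_const _ _ ANCHOR_WHEN (r / ANCHOR_WHEN.length) (r % ANCHOR_WHEN.length)
        (fun a _ => by simp) (by simp only [hn]; omega) (by simp only [hn]; omega)]
  rw [getD_map_of_lt _ _ _ (by simp only [hn]; omega)]

lemma tier4_getD (base : List String) (q r : Nat) (hq : q < base.length) (hr : r < 41 * 41 * 41) :
    (tier4 base).getD (q * (41 * 41 * 41) + r) "" =
      base.getD q "" ++ "; " ++ ANCHOR_WHEN.getD (r / (41 * 41)) "" ++ "; " ++ ANCHOR_WHEN.getD (r % (41 * 41) / 41) "" ++ "; " ++ ANCHOR_WHEN.getD (r % (41 * 41) % 41) "" := by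
  have hn : ANCHOR_WHEN.length = 41 := rfl
  have hr' : r < ANCHOR_WHEN.length * (ANCHOR_WHEN.length * ANCHOR_WHEN.length) := by simp only [hn]; omega
  rw [show ((41 : Nat) * 41 * 41) = ANCHOR_WHEN.length * (ANCHOR_WHEN.length * ANCHOR_WHEN.length) from by rw [hn]]
  simp only [tier4]
  rw [getD_flatMap_const _ _ base q r
        (fun a _ => flatMap_length_const _ _ _ (fun b _ => flatMap_length_const _ _ _ (fun c _ => by simp))) hq hr']
  conv_lhs => rw [← Nat.div_add_mod' r (41 * 41)]
  rw [show ((41 : Nat) * 41) = ANCHOR_WHEN.length * ANCHOR_WHEN.length from rfl]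
  rw [getD_flatMap_const _ _ ANCHOR_WHEN (r / (ANCHOR_WHEN.length * ANCHOR_WHEN.length)) (r % (ANCHOR_WHEN.length * ANCHOR_WHEN.length))
        (fun a _ => flatMap_length_const _ _ _ (fun b _ => by simp)) (by simp only [hn]; omega) (by simp only [hn]; omega)]
  conv_lhs => rw [← Nat.div_add_mod' (r % (ANCHOR_WHEN.length * ANCHOR_WHEN.length)) 41]
  rw [show (41 : Nat) = ANCHOR_WHEN.length from rfl]
  rw [getD_flatMap_const _ _ ANCHOR_WHEN (r % (ANCHOR_WHEN.length * ANCHOR_WHEN.length) / ANCHOR_WHEN.length) (r % (ANCHOR_WHEN.length * ANCHOR_WHEN.length) % ANCHOR_WHEN.length)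
        (fun a _ => by simp) (by simp only [hn]; omega) (by simp only [hn]; omega)]
  rw [getD_map_of_lt _ _ _ (by simp only [hn]; omega)]

lemma candAt_eq (base : List String) (i : Nat) (hi : i < (tierCands base).length) :
    candAt base i = (tierCands base).getD i "" := by
  have hn : ANCHOR_WHEN.length = 41 := rfl
  have ht1 : (tier1 base).length = base.length * 41 := by rw [length_tier1, hn]
  have ht2 : (tier2 base).length = base.length * 41 := by rw [length_tier2, hn]
  have ht3 : (tier3 base).length = base.length * (41 * 41) := by rw [length_tier3, hn]
  have ht4 : (tier4 base).length = base.length * (41 * (41 * 41)) := by rw [length_tier4, hn]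
  have e : tierCands base = tier1 base ++ (tier2 base ++ (tier3 base ++ tier4 base)) := by
    simp [tierCands]
  rw [e] at hi ⊢
  simp only [List.length_append, ht1, ht2, ht3, ht4] at hi
  simp only [candAt, hn]
  split
  · next h1 =>
    rw [List.getD_append _ _ _ _ (by omega)]
    conv_rhs => rw [← Nat.div_add_mod' i 41]
    rw [tier1_getD base _ _ (by omega) (by omega)]
  · next h1 =>
    rw [List.getD_append_right _ _ _ _ (by omega), ht1]
    split
    · next h2 =>
      rw [List.getD_append _ _ _ _ (by omega)]
      conv_rhs => rw [← Nat.div_add_mod' (i - base.length * 41) 41]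
      rw [tier2_getD base _ _ (by omega) (by omega)]
    · next h2 =>
      rw [List.getD_append_right _ _ _ _ (by omega), ht2]
      split
      · next h3 =>
        rw [List.getD_append _ _ _ _ (by omega)]
        conv_rhs => rw [← Nat.div_add_mod' (i - base.length * 41 - base.length * 41) (41 * 41)]
        rw [tier3_getD base _ _ (by omega) (by omega)]
      · next h3 =>
        rw [List.getD_append_right _ _ _ _ (by omega), ht3]
        rw [show i - base.length * 41 - base.length * 41 - base.length * (41 * 41)
              = i - base.length * 41 - base.length * 41 - base.length * 41 * 41 from by omega]
        conv_rhs => rw [← Nat.div_add_mod' (i - base.length * 41 - base.length * 41 - base.length * 41 * 41) (41 * 41 * 41)]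
        rw [tier4_getD base _ _ (by omega) (by omega)]

lemma fsAltLoop_eq_runT (base : List String) (need : Int) : ∀ (fuel i : Nat) (out : List String) (seen : PySem.Set String),
    i + fuel = (tierCands base).length →
    fsAltLoop base need out seen i fuel = runT need out seen ((tierCands base).drop i) := by
  intro fuel
  induction fuel with
  | zero =>
    intro i out seen h
    rw [List.drop_of_length_le (by omega)]
    rfl
  | succ fuel ih =>
    intro i out seen h
    have hi : i < (tierCands base).length := by omega
    rw [List.drop_eq_getElem_cons hi]
    simp only [fsAltLoop, runT]
    split
    · rfl
    · have hc : candAt base i = (tierCands base)[i] := by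
        rw [candAt_eq base i hi, List.getD_eq_getElem _ _ hi]
      rw [hc]
      split
      · exact ih (i + 1) out seen (by omega)
      · exact ih (i + 1) _ _ (by omega)

lemma alt_eq_runT (base : List String) (need : Int) :
    fill_semantic_alt base need = runT need base (PySem.Set.ofList base) (tierCands base) := by
  have hl : base.length * (2 * ANCHOR_WHEN.length + ANCHOR_WHEN.length * ANCHOR_WHEN.length + ANCHOR_WHEN.length * ANCHOR_WHEN.length * ANCHOR_WHEN.length) = (tierCands base).length := by
    rw [length_tierCands]
  simp only [fill_semantic_alt]
  rw [hl]
  have := fsAltLoop_eq_runT base need ((tierCands base).length) 0 base (PySem.Set.ofList base) (by omega)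
  simpa using this

-- ===== VERDICT (by name: the statement is the Claim_ definition above) =====
theorem fill_semantic_spec : Claim_equal_fill_semantic := by
  unfold Claim_equal_fill_semantic
  intro base need _
  unfold Spec_fill_semantic
  rw [alt_eq_runT]
  by_cases h : need ≤ ((base.length : Nat) : Int)
  · rw [runT_of_full _ _ _ _ h]
    simp only [fill_semantic]
    rw [if_pos h]
  · rw [← runC_eq_runT need (tierCands base) base (PySem.Set.ofList base) h]
    exact fill_semantic_eq_runC base need h
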